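-- pv_equiv track=rewrite | github.com/nikfuzz/DataStructures_Algorithms | maths/Mod_Sum.py | solve
-- ===== SOURCE A (Python) =====
-- def solve(a):
--
--     m = 10**9 + 7
--
--     max_a = max(a)
--     freq = [0 for i in range(max_a+1)]
--
--     for i in a:
--         freq[i] += 1
--
--     ans = 0
--     for i in range(1,max_a+1):
--         for j in range(1,max_a+1):
--             ans += (freq[i] * freq[j]) * (i%j)
--             ans = ans % m
--
--     return ans
-- ===== SOURCE B (Python) =====
-- def solve(a):
--     m = 10**9 + 7
--     max_a = max(a)
--     freq = [0] * (max_a + 1)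
--     for v in a:
--         freq[v] += 1
--     # suffix counts, built by appending to a reversed running sum:
--     # after the loop rev == [0, sum(freq[max_a:]), sum(freq[max_a-1:]), ..., sum(freq[1:])]
--     rev = [0]
--     for x in range(max_a, 0, -1):
--         rev.append(freq[x] + rev[-1])
--     suf = [0] + rev[::-1]          # suf[t] == freq[t] + freq[t+1] + ... + freq[max_a]  (1 <= t <= max_a)
--     S = 0
--     for i in range(1, max_a + 1):
--         S += i * freq[i]
--     # sum_i freq[i]*(i % j) == S - j * sum_i freq[i]*(i//j), and
--     # sum_i freq[i]*(i//j) == sum over multiples t of j of suf[t]  (harmonic decomposition)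
--     ans = 0
--     for j in range(1, max_a + 1):
--         if freq[j]:
--             T = 0
--             for t in range(j, max_a + 1, j):
--                 T += suf[t]
--             ans += freq[j] * (S - j * T)
--     return ans % m
-- ===== Notes on version B (the rewrite author's own statement) =====
-- stated objective: faster
-- what changed: Replaces the O(max^2) double loop over all (i,j) pairs by a harmonic decomposition: using i%j = i - j*(i//j), the answer becomes sum_j freq[j]*(S - j*T_j) where S is the weighted sum of values and T_j is obtained by adding a precomputed suffix-count array at the multiples of j, so the inner scan over all i disappears.
import Mathlib
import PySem

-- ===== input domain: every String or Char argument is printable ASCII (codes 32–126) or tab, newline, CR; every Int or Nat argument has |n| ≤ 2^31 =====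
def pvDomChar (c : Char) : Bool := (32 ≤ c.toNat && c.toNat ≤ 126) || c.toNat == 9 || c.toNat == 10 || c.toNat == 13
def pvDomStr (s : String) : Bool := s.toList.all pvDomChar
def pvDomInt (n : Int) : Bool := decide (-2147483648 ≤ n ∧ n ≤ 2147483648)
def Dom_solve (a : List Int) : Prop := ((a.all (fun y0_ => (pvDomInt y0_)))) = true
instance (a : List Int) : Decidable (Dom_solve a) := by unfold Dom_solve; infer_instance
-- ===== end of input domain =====

-- B replaces A's O(max^2) double loop by a harmonic decomposition over a suffix-count
-- array (i%j = i - j*(i//j), summed per divisor j over its multiples); faster.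
-- Neither program mutates its argument.

-- ===== PORT A =====
-- freq[i] += 1  (read then write; none = IndexError, unreachable under Pre_)
def bumpA (freq : List Int) (i : Int) : List Int :=
  match PySem.List.pyGet? freq i with
  | some v => (PySem.List.pySet? freq i (v + 1)).getD freq
  | none => freq

def solve (a : List Int) : Int :=
  let m : Int := 10 ^ 9 + 7
  match PySem.List.max? a (fun x => x) with
  | none => 0   -- max([]) raises ValueError; outside Pre_
  | some max_a =>
    let freq : List Int := (PySem.List.pyRange 0 (max_a + 1) 1).map (fun _ => 0)
    let freq := a.foldl bumpA freq
    let ans : Int := 0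
    (PySem.List.pyRange 1 (max_a + 1) 1).foldl (fun ans i =>
      (PySem.List.pyRange 1 (max_a + 1) 1).foldl (fun ans j =>
        PySem.Int.mod (ans + (PySem.List.pyGetD freq i 0 * PySem.List.pyGetD freq j 0) * PySem.Int.mod i j) m) ans) ans

-- ===== PORT B =====
def solve_alt (a : List Int) : Int :=
  let m : Int := 10 ^ 9 + 7
  match PySem.List.max? a (fun x => x) with
  | none => 0   -- max([]) raises ValueError; outside Pre_
  | some max_a =>
    let freq : List Int := List.replicate (max_a + 1).toNat 0
    let freq := a.foldl bumpA freq
    let rev : List Int := (PySem.List.pyRange max_a 0 (-1)).foldl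
        (fun rev x => rev ++ [PySem.List.pyGetD freq x 0 + PySem.List.pyGetD rev (-1) 0]) [0]
    let suf : List Int := [0] ++ ((PySem.List.slice? rev none none (-1)).getD rev)
    let S : Int := (PySem.List.pyRange 1 (max_a + 1) 1).foldl
        (fun S i => S + i * PySem.List.pyGetD freq i 0) 0
    let ans : Int := (PySem.List.pyRange 1 (max_a + 1) 1).foldl
        (fun ans j =>
          if PySem.List.pyGetD freq j 0 ≠ 0 then
            ans + PySem.List.pyGetD freq j 0 *
              (S - j * (PySem.List.pyRange j (max_a + 1) j).foldl
                         (fun T t => T + PySem.List.pyGetD suf t 0) 0)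
          else ans) 0
    PySem.Int.mod ans m

-- ===== PRECONDITION & SPEC =====
-- Pre_ excludes exactly the inputs where A raises: the empty list (max([]) is a
-- ValueError) and lists containing an element below -(max(a)+1), where freq[v] += 1
-- is an IndexError.  Elements in [-(max+1), -1] (Python's negative-index wraparound)
-- and 0 stay inside Pre_: both programs run the same counting loop there.
def Pre_solve (a : List Int) : Prop := a ≠ [] ∧ ∀ x ∈ a, ∃ y ∈ a, 0 ≤ x + y + 1
instance (a : List Int) : Decidable (Pre_solve a) := by unfold Pre_solve; infer_instance

def pvWitness_solve : List Int := [1, 2]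

def Spec_solve (a : List Int) (out : Int) : Prop := out = solve_alt a
instance (a : List Int) (out : Int) : Decidable (Spec_solve a out) := by unfold Spec_solve; infer_instance

-- ===== CLAIM (what is proved, stated in full; the proofs are below) =====
def Claim_equal_solve : Prop := ∀ (a : List Int), Dom_solve a → Pre_solve a → Spec_solve a (solve a)

-- ===== LEMMAS AND PROOFS =====

-- the suffix count  suf[t] = freq[t] + … + freq[n]
def sufOf (F : Nat → Int) (n t : Nat) : Int := ∑ i ∈ Finset.Ico t (n + 1), F i

-- sum of a mapped List.range is the Finset.range sum
lemma list_range_sum (n : Nat) (h : Nat → Int) :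
    ((List.range n).map h).sum = ∑ k ∈ Finset.range n, h k := by
  induction n with
  | zero => simp
  | succ n ih => rw [List.range_succ, Finset.sum_range_succ, List.map_append]; simp [ih]

-- sum over range(1, n+1) as a Finset sum over the naturals 1..n
lemma sum_map_pyRange_one (n : Nat) (g : Int → Int) :
    ((PySem.List.pyRange 1 ((n : Int) + 1) 1).map g).sum = ∑ k ∈ Finset.Ico 1 (n + 1), g (k : Int) := by
  rw [PySem.List.pyRange_one, List.map_map, Finset.sum_Ico_eq_sum_range]
  have : ((n : Int) + 1 - 1).toNat = n := by omega
  rw [this, show n + 1 - 1 = n from rfl, list_range_sum]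
  apply Finset.sum_congr rfl
  intro k _
  simp only [Function.comp]
  have hk : (1:Int) + (k:Int) = ((1 + k : Nat) : Int) := by omega
  rw [hk]

-- the repeatedly-reduced fold equals the reduced plain sum
lemma foldl_mod_add (m : Int) (hm : 0 < m) (ts : List Int) : ∀ x : Int,
    ts.foldl (fun ans t => PySem.Int.mod (ans + t) m) (PySem.Int.mod x m)
      = PySem.Int.mod (x + ts.sum) m := by
  induction ts with
  | nil => intro x; simp
  | cons t ts ih =>
    intro x
    simp only [List.foldl_cons, List.sum_cons]
    have : PySem.Int.mod (PySem.Int.mod x m + t) m = PySem.Int.mod (x + t) m := by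
      simp only [PySem.Int.mod_eq_emod_of_pos hm]
      exact Int.emod_add_emod x m t
    rw [this, ih (x + t)]
    ring_nf

lemma foldl_mod_add2 (m : Int) (hm : 0 < m) (L : List Int) (F : Int → List Int) : ∀ x : Int,
    L.foldl (fun ans i => (F i).foldl (fun ans t => PySem.Int.mod (ans + t) m) ans)
        (PySem.Int.mod x m)
      = PySem.Int.mod (x + (L.map (fun i => (F i).sum)).sum) m := by
  induction L with
  | nil => intro x; simp
  | cons i L ih =>
    intro x
    simp only [List.foldl_cons, List.map_cons, List.sum_cons]
    rw [foldl_mod_add m hm (F i) x, ih (x + (F i).sum)]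
    ring_nf

-- A's double loop with per-step reduction, as the reduced double sum
lemma nested_fold_mod (R : List Int) (m : Int) (hm : 0 < m) (t : Int → Int → Int) :
    R.foldl (fun ans i => R.foldl (fun ans j => PySem.Int.mod (ans + t i j) m) ans) 0
      = PySem.Int.mod ((R.map (fun i => (R.map (t i)).sum)).sum) m := by
  have h0 : (0 : Int) = PySem.Int.mod 0 m := by
    rw [PySem.Int.mod_eq_emod_of_pos hm]; simp
  have hshape : ∀ (ans i : Int),
      R.foldl (fun ans j => PySem.Int.mod (ans + t i j) m) ans
        = (R.map (t i)).foldl (fun ans u => PySem.Int.mod (ans + u) m) ans := by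
    intro ans i; rw [List.foldl_map]
  conv_lhs => rw [h0]
  simp only [hshape]
  rw [foldl_mod_add2 m hm R (fun i => R.map (t i)) 0]
  ring_nf

-- the count lemma: multiples of j up to i, counted via s ≤ i/j
lemma key2 (n j : Nat) (hj : 1 ≤ j) (F : Nat → Int) :
    ∑ s ∈ Finset.Ico 1 (n / j + 1), sufOf F n (j * s)
      = ∑ i ∈ Finset.Ico 1 (n + 1), F i * ((i / j : Nat) : Int) := by
  have h1 : ∀ s ∈ Finset.Ico 1 (n / j + 1),
      sufOf F n (j * s) = ∑ i ∈ Finset.Ico 1 (n + 1), if j * s ≤ i then F i else 0 := by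
    intro s hs
    rw [Finset.mem_Ico] at hs
    have hjs : 1 * 1 ≤ j * s := Nat.mul_le_mul hj hs.1
    rw [sufOf, ← Finset.sum_filter]
    congr 1
    ext i
    simp only [Finset.mem_filter, Finset.mem_Ico]
    omega
  rw [Finset.sum_congr rfl h1, Finset.sum_comm]
  apply Finset.sum_congr rfl
  intro i hi
  rw [Finset.mem_Ico] at hi
  have hdle : i / j ≤ n / j := Nat.div_le_div_right (by omega)
  have h2 : ∀ s ∈ Finset.Ico 1 (n / j + 1),
      (if j * s ≤ i then F i else 0) = (if s ≤ i / j then F i else 0) := by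
    intro s _
    congr 1
    simp only [eq_iff_iff]
    rw [Nat.le_div_iff_mul_le (by omega), Nat.mul_comm]
  rw [Finset.sum_congr rfl h2, ← Finset.sum_filter]
  have h3 : (Finset.Ico 1 (n / j + 1)).filter (fun s => s ≤ i / j) = Finset.Ico 1 (i / j + 1) := by
    ext s
    simp only [Finset.mem_filter, Finset.mem_Ico]
    omega
  rw [h3, Finset.sum_const, Nat.card_Ico]
  simp [mul_comm]

-- per divisor j: the modular column sum via the suffix counts
lemma key3 (n j : Nat) (hj : 1 ≤ j) (F : Nat → Int) :
    ∑ i ∈ Finset.Ico 1 (n + 1), F i * ((i % j : Nat) : Int)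
      = (∑ i ∈ Finset.Ico 1 (n + 1), (i : Int) * F i)
        - (j : Int) * ∑ s ∈ Finset.Ico 1 (n / j + 1), sufOf F n (j * s) := by
  rw [key2 n j hj F, Finset.mul_sum, ← Finset.sum_sub_distrib]
  apply Finset.sum_congr rfl
  intro i _
  have hdm : j * (i / j) + i % j = i := Nat.div_add_mod i j
  have h2 : (j : Int) * ((i / j : Nat) : Int) + ((i % j : Nat) : Int) = (i : Int) := by
    exact_mod_cast hdm
  have h3 : ((i % j : Nat) : Int) = (i : Int) - (j : Int) * ((i / j : Nat) : Int) := by linarith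
  rw [h3]
  ring

-- the rev-building loop: appending running suffix sums, from max_a down to 1
lemma rev_go (freq : List Int) (n : Nat) : ∀ (c : Nat), c ≤ n → ∀ (acc : List Int),
    PySem.List.pyGetD acc (-1) 0 = sufOf (fun i => freq.getD i 0) n (c + 1) →
    (PySem.List.pyRange (c : Int) 0 (-1)).foldl
        (fun rev x => rev ++ [PySem.List.pyGetD freq x 0 + PySem.List.pyGetD rev (-1) 0]) acc
      = acc ++ (List.range c).map (fun k => sufOf (fun i => freq.getD i 0) n (c - k)) := by
  intro c
  induction c with
  | zero =>
    intro _ acc _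
    rw [PySem.List.pyRange_neg_one_eq_nil (by omega)]
    simp
  | succ c ih =>
    intro hc acc hlast
    rw [show ((c + 1 : Nat) : Int) = (c : Int) + 1 from by push_cast; ring]
    rw [PySem.List.pyRange_neg_one_cons (by omega : (0:Int) < (c:Int) + 1)]
    rw [List.foldl_cons]
    have hstep : acc ++ [PySem.List.pyGetD freq ((c : Int) + 1) 0 + PySem.List.pyGetD acc (-1) 0]
        = acc ++ [sufOf (fun i => freq.getD i 0) n (c + 1)] := by
      have hidx : ((c : Int) + 1) = ((c + 1 : Nat) : Int) := by push_cast; ring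
      rw [hidx, PySem.List.pyGetD_natCast, hlast]
      have hsplit : sufOf (fun i => freq.getD i 0) n (c + 1)
          = freq.getD (c + 1) 0 + sufOf (fun i => freq.getD i 0) n (c + 2) := by
        rw [sufOf, sufOf, Finset.sum_eq_sum_Ico_succ_bot (by omega)]
      rw [hsplit]
    rw [show ((c : Int) + 1 - 1) = (c : Int) from by ring, hstep,
        ih (by omega) _ (by rw [PySem.List.pyGetD_neg_one_append_singleton])]
    rw [List.append_assoc]
    congr 1
    rw [List.range_succ_eq_map]
    simp only [List.map_cons, List.map_map, List.singleton_append, Nat.sub_zero]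
    congr 1
    apply List.map_congr_left
    intro k _
    simp only [Function.comp_apply]
    congr 1
    omega

-- lookup in suf = [0] + rev[::-1]
lemma suf_lookup (freq : List Int) (n : Nat) (t : Nat) (ht1 : 1 ≤ t) (ht2 : t ≤ n) :
    PySem.List.pyGetD
      ((0:Int) :: (((List.range n).map (fun k => sufOf (fun i => freq.getD i 0) n (n - k))).reverse ++ [(0:Int)]))
      (t : Int) 0
      = sufOf (fun i => freq.getD i 0) n t := by
  rw [PySem.List.pyGetD_natCast]
  obtain ⟨s, rfl⟩ : ∃ s, t = s + 1 := ⟨t - 1, by omega⟩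
  have hs : s < n := by omega
  rw [List.getD_cons_succ]
  have hlen : ((List.range n).map (fun k => sufOf (fun i => freq.getD i 0) n (n - k))).reverse.length = n := by
    simp
  rw [List.getD_append _ _ _ _ (by omega)]
  rw [List.getD_eq_getElem?_getD, List.getElem?_eq_getElem (by omega), Option.getD_some]
  rw [List.getElem_reverse]
  simp only [List.getElem_map, List.getElem_range, List.length_map, List.length_range]
  congr 1
  omega


-- the guarded harmonic sum equals the plain double modular sum
lemma finset_eq (n : Nat) (F : Nat → Int) :
    ∑ i ∈ Finset.Ico 1 (n + 1), ∑ j ∈ Finset.Ico 1 (n + 1), F i * F j * ((i % j : Nat) : Int)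
      = ∑ j ∈ Finset.Ico 1 (n + 1),
          if F j ≠ 0 then
            F j * ((∑ i ∈ Finset.Ico 1 (n + 1), (i : Int) * F i)
              - (j : Int) * ∑ s ∈ Finset.Ico 1 (n / j + 1), sufOf F n (j * s))
          else 0 := by
  rw [Finset.sum_comm]
  apply Finset.sum_congr rfl
  intro j hj
  rw [Finset.mem_Ico] at hj
  rw [← key3 n j (by omega) F]
  by_cases hFj : F j = 0
  · simp [hFj]
  · rw [if_pos hFj, Finset.mul_sum]
    apply Finset.sum_congr rfl
    intro i _
    ring

-- the main argument: for any freq of length n+1, A's double loop = B's harmonic form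
lemma central (n : Nat) (freq : List Int) :
    (PySem.List.pyRange 1 ((n : Int) + 1) 1).foldl (fun ans i =>
      (PySem.List.pyRange 1 ((n : Int) + 1) 1).foldl (fun ans j =>
        PySem.Int.mod (ans + (PySem.List.pyGetD freq i 0 * PySem.List.pyGetD freq j 0) * PySem.Int.mod i j) (10 ^ 9 + 7)) ans) 0
    = (let rev : List Int := (PySem.List.pyRange (n : Int) 0 (-1)).foldl
          (fun rev x => rev ++ [PySem.List.pyGetD freq x 0 + PySem.List.pyGetD rev (-1) 0]) [0]
       let suf : List Int := [0] ++ ((PySem.List.slice? rev none none (-1)).getD rev)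
       let S : Int := (PySem.List.pyRange 1 ((n : Int) + 1) 1).foldl
          (fun S i => S + i * PySem.List.pyGetD freq i 0) 0
       let ans : Int := (PySem.List.pyRange 1 ((n : Int) + 1) 1).foldl
          (fun ans j =>
            if PySem.List.pyGetD freq j 0 ≠ 0 then
              ans + PySem.List.pyGetD freq j 0 *
                (S - j * (PySem.List.pyRange j ((n : Int) + 1) j).foldl
                           (fun T t => T + PySem.List.pyGetD suf t 0) 0)
            else ans) 0
       PySem.Int.mod ans (10 ^ 9 + 7)) := by
  have hm : (0:Int) < 10 ^ 9 + 7 := by norm_num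
  show _ = PySem.Int.mod ((PySem.List.pyRange 1 ((n : Int) + 1) 1).foldl
        (fun ans j =>
          if PySem.List.pyGetD freq j 0 ≠ 0 then
            ans + PySem.List.pyGetD freq j 0 *
              (((PySem.List.pyRange 1 ((n : Int) + 1) 1).foldl (fun S i => S + i * PySem.List.pyGetD freq i 0) 0) - j * ((PySem.List.pyRange j ((n : Int) + 1) j).foldl (fun T t => T + PySem.List.pyGetD ([0] ++ ((PySem.List.slice? ((PySem.List.pyRange (n : Int) 0 (-1)).foldl
        (fun rev x => rev ++ [PySem.List.pyGetD freq x 0 + PySem.List.pyGetD rev (-1) 0]) [0]) none none (-1)).getD ((PySem.List.pyRange (n : Int) 0 (-1)).foldl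
        (fun rev x => rev ++ [PySem.List.pyGetD freq x 0 + PySem.List.pyGetD rev (-1) 0]) [0]))) t 0) 0))
          else ans) 0) (10 ^ 9 + 7)
  have hrev : ((PySem.List.pyRange (n : Int) 0 (-1)).foldl
        (fun rev x => rev ++ [PySem.List.pyGetD freq x 0 + PySem.List.pyGetD rev (-1) 0]) [0])
      = [0] ++ ((List.range n).map (fun k => sufOf (fun i => freq.getD i 0) n (n - k))) := by
    apply rev_go freq n n (le_refl n)
    rw [show ([(0:Int)]) = ([] ++ [(0:Int)]) from rfl, PySem.List.pyGetD_neg_one_append_singleton]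
    simp [sufOf]
  rw [hrev]
  have hsuf : ([0] ++ ((PySem.List.slice? ([0] ++ ((List.range n).map (fun k => sufOf (fun i => freq.getD i 0) n (n - k)))) none none (-1)).getD ([0] ++ ((List.range n).map (fun k => sufOf (fun i => freq.getD i 0) n (n - k))))) : List Int)
      = ((0:Int) :: (((List.range n).map (fun k => sufOf (fun i => freq.getD i 0) n (n - k))).reverse ++ [(0:Int)])) := by
    rw [PySem.List.slice?_none_none_neg_one, Option.getD_some]
    simp
  rw [hsuf]
  have hS : ((PySem.List.pyRange 1 ((n : Int) + 1) 1).foldl (fun S i => S + i * PySem.List.pyGetD freq i 0) 0) = ∑ i ∈ Finset.Ico 1 (n + 1), (i : Int) * freq.getD i 0 := by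
    rw [PySem.List.foldl_add _ (fun i => i * PySem.List.pyGetD freq i 0) 0, zero_add,
        sum_map_pyRange_one n (fun i => i * PySem.List.pyGetD freq i 0)]
    exact Finset.sum_congr rfl (fun k _ => by rw [PySem.List.pyGetD_natCast])
  rw [hS]
  have hstep : ∀ (acc : Int), ∀ j ∈ (PySem.List.pyRange 1 ((n : Int) + 1) 1),
      (if PySem.List.pyGetD freq j 0 ≠ 0 then
         acc + PySem.List.pyGetD freq j 0 * ((∑ i ∈ Finset.Ico 1 (n + 1), (i : Int) * freq.getD i 0) - j * ((PySem.List.pyRange j ((n : Int) + 1) j).foldl (fun T t => T + PySem.List.pyGetD (((0:Int) :: (((List.range n).map (fun k => sufOf (fun i => freq.getD i 0) n (n - k))).reverse ++ [(0:Int)]))) t 0) 0))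
       else acc)
      = acc + (if PySem.List.pyGetD freq j 0 ≠ 0 then
          PySem.List.pyGetD freq j 0 * ((∑ i ∈ Finset.Ico 1 (n + 1), (i : Int) * freq.getD i 0) - j * ((PySem.List.pyRange j ((n : Int) + 1) j).foldl (fun T t => T + PySem.List.pyGetD (((0:Int) :: (((List.range n).map (fun k => sufOf (fun i => freq.getD i 0) n (n - k))).reverse ++ [(0:Int)]))) t 0) 0)) else 0) := by
    intro acc j _
    split_ifs <;> simp
  rw [PySem.List.foldl_congr_mem (PySem.List.pyRange 1 ((n : Int) + 1) 1) _
        (fun acc j => acc + (if PySem.List.pyGetD freq j 0 ≠ 0 then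
          PySem.List.pyGetD freq j 0 * ((∑ i ∈ Finset.Ico 1 (n + 1), (i : Int) * freq.getD i 0) - j * ((PySem.List.pyRange j ((n : Int) + 1) j).foldl (fun T t => T + PySem.List.pyGetD (((0:Int) :: (((List.range n).map (fun k => sufOf (fun i => freq.getD i 0) n (n - k))).reverse ++ [(0:Int)]))) t 0) 0)) else 0)) 0 hstep,
      PySem.List.foldl_add _ (fun j => if PySem.List.pyGetD freq j 0 ≠ 0 then
          PySem.List.pyGetD freq j 0 * ((∑ i ∈ Finset.Ico 1 (n + 1), (i : Int) * freq.getD i 0) - j * ((PySem.List.pyRange j ((n : Int) + 1) j).foldl (fun T t => T + PySem.List.pyGetD (((0:Int) :: (((List.range n).map (fun k => sufOf (fun i => freq.getD i 0) n (n - k))).reverse ++ [(0:Int)]))) t 0) 0)) else 0) 0, zero_add,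
      sum_map_pyRange_one n (fun j => if PySem.List.pyGetD freq j 0 ≠ 0 then
          PySem.List.pyGetD freq j 0 * ((∑ i ∈ Finset.Ico 1 (n + 1), (i : Int) * freq.getD i 0) - j * ((PySem.List.pyRange j ((n : Int) + 1) j).foldl (fun T t => T + PySem.List.pyGetD (((0:Int) :: (((List.range n).map (fun k => sufOf (fun i => freq.getD i 0) n (n - k))).reverse ++ [(0:Int)]))) t 0) 0)) else 0)]
  rw [nested_fold_mod (PySem.List.pyRange 1 ((n : Int) + 1) 1) (10 ^ 9 + 7) hm
        (fun i j => PySem.List.pyGetD freq i 0 * PySem.List.pyGetD freq j 0 * PySem.Int.mod i j),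
      sum_map_pyRange_one n (fun i => ((PySem.List.pyRange 1 ((n : Int) + 1) 1).map
        (fun j => PySem.List.pyGetD freq i 0 * PySem.List.pyGetD freq j 0 * PySem.Int.mod i j)).sum)]
  congr 1
  have hT : ∀ j' : Nat, 1 ≤ j' → j' ≤ n →
      ((PySem.List.pyRange (↑j' : Int) ((n : Int) + 1) (↑j' : Int)).foldl
        (fun T t => T + PySem.List.pyGetD (((0:Int) :: (((List.range n).map (fun k => sufOf (fun i => freq.getD i 0) n (n - k))).reverse ++ [(0:Int)]))) t 0) 0)
      = ∑ s ∈ Finset.Ico 1 (n / j' + 1), sufOf (fun i => freq.getD i 0) n (j' * s) := by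
    intro j' h1 h2
    have hj0 : (0:Int) < (j' : Int) := by omega
    rw [PySem.List.pyRange_of_pos (↑j') ((n : Int) + 1) hj0]
    have hcnt : (if (↑j' : Int) < (n : Int) + 1 then
        (((n : Int) + 1 - ↑j' + ↑j' - 1) / ↑j').toNat else 0) = n / j' := by
      rw [if_pos (by omega)]
      rw [show ((n : Int) + 1 - ↑j' + ↑j' - 1) = (n : Int) from by ring]
      rw [← Int.natCast_div, Int.toNat_natCast]
    rw [hcnt, List.foldl_map,
        PySem.List.foldl_add _ (fun k : Nat => PySem.List.pyGetD (((0:Int) :: (((List.range n).map (fun k => sufOf (fun i => freq.getD i 0) n (n - k))).reverse ++ [(0:Int)]))) ((↑j' : Int) + ↑j' * ↑k) 0) 0,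
        zero_add, list_range_sum, Finset.sum_Ico_eq_sum_range]
    apply Finset.sum_congr (by simp)
    intro k hk
    rw [Finset.mem_range] at hk
    have hk' : k < n / j' := by omega
    rw [show ((↑j' : Int) + ↑j' * ↑k) = ((j' * (1 + k) : Nat) : Int) from by push_cast; ring]
    have hb1 : 1 ≤ j' * (1 + k) := by
      have := Nat.mul_le_mul h1 (Nat.le_add_right 1 k)
      omega
    have hb2 : j' * (1 + k) ≤ n := by
      calc j' * (1 + k) ≤ j' * (n / j') := Nat.mul_le_mul_left j' (by omega)
        _ = (n / j') * j' := Nat.mul_comm _ _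
        _ ≤ n := Nat.div_mul_le_self n j'
    rw [suf_lookup freq n (j' * (1 + k)) hb1 hb2]
  have hAin : ∀ i' ∈ Finset.Ico 1 (n + 1),
      ((PySem.List.pyRange 1 ((n : Int) + 1) 1).map (fun j => PySem.List.pyGetD freq (↑i' : Int) 0 * PySem.List.pyGetD freq j 0 *
        PySem.Int.mod (↑i' : Int) j)).sum
      = ∑ j ∈ Finset.Ico 1 (n + 1),
          freq.getD i' 0 * freq.getD j 0 * ((i' % j : Nat) : Int) := by
    intro i' _
    rw [sum_map_pyRange_one n (fun j => PySem.List.pyGetD freq (↑i' : Int) 0 *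
          PySem.List.pyGetD freq j 0 * PySem.Int.mod (↑i' : Int) j)]
    refine Finset.sum_congr rfl (fun j' _ => ?_)
    rw [PySem.List.pyGetD_natCast, PySem.List.pyGetD_natCast, PySem.Int.mod_natCast]
  rw [Finset.sum_congr rfl hAin]
  have hBin : ∀ j' ∈ Finset.Ico 1 (n + 1),
      (if PySem.List.pyGetD freq (↑j' : Int) 0 ≠ 0 then
         PySem.List.pyGetD freq (↑j' : Int) 0 * ((∑ i ∈ Finset.Ico 1 (n + 1), (i : Int) * freq.getD i 0) - ↑j' *
           ((PySem.List.pyRange (↑j' : Int) ((n : Int) + 1) (↑j' : Int)).foldl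
             (fun T t => T + PySem.List.pyGetD (((0:Int) :: (((List.range n).map (fun k => sufOf (fun i => freq.getD i 0) n (n - k))).reverse ++ [(0:Int)]))) t 0) 0)) else 0)
      = (if freq.getD j' 0 ≠ 0 then
          freq.getD j' 0 * ((∑ i ∈ Finset.Ico 1 (n + 1), (i : Int) * freq.getD i 0) - (↑j' : Int) *
            ∑ s ∈ Finset.Ico 1 (n / j' + 1), sufOf (fun i => freq.getD i 0) n (j' * s)) else 0) := by
    intro j' hj'
    rw [Finset.mem_Ico] at hj'
    rw [PySem.List.pyGetD_natCast, hT j' (by omega) (by omega)]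
  rw [Finset.sum_congr rfl hBin]
  exact finset_eq n (fun i => freq.getD i 0)

-- ===== VERDICT (by name: the statement is the Claim_ definition above) =====
theorem solve_spec : Claim_equal_solve := by
  intro a _ hpre
  obtain ⟨hne, hbound⟩ := hpre
  show solve a = solve_alt a
  obtain ⟨M, hM⟩ : ∃ M, PySem.List.max? a (fun x => x) = some M := by
    cases h : PySem.List.max? a (fun x => x) with
    | none => exact absurd ((PySem.List.max?_eq_none_iff a _).mp h) hne
    | some M => exact ⟨M, rfl⟩
  have hMmem := PySem.List.max?_mem hM
  have hMmax := PySem.List.max?_isMax hM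
  have hM0 : 0 ≤ M := by
    obtain ⟨y, hy, hxy⟩ := hbound M hMmem
    have hyM := hMmax y hy
    omega
  obtain ⟨n, rfl⟩ : ∃ n : Nat, M = (n : Int) := ⟨M.toNat, by omega⟩
  have hrep : (PySem.List.pyRange 0 ((n : Int) + 1) 1).map (fun _ => (0:Int))
      = List.replicate ((n : Int) + 1).toNat 0 := by
    rw [List.map_const']
    congr 1
    simp [PySem.List.length_pyRange_one]
  simp only [solve, solve_alt, hM, hrep]
  exact central n _
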